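-- pv_equiv track=rewrite | github.com/lavorato/autovideos | execution/00b_editor.py | _apply_phrase_replacement
-- ===== SOURCE A (Python) =====
-- _PUNCT = set('.,!?¿¡"\'`´“”„‘’«»()[]{}:;…—–-•·')
--
-- def _split_token(token: str) -> tuple[str, str, str]:
--     i, n = 0, len(token)
--     while i < n and token[i] in _PUNCT:
--         i += 1
--     j = n
--     while j > i and token[j - 1] in _PUNCT:
--         j -= 1
--     return token[:i], token[i:j], token[j:]
--
-- def _core(token: str) -> str:
--     return _split_token(token)[1]
--
-- def _phrase_match_at(words: list[dict], i: int, phrase: list[str], ci: bool) -> int: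
--     """Return the number of token slots consumed if ``words[i:]`` starts with
--     ``phrase`` (ignoring empty/cleared slots in between), else 0.
--
--     Comparison is done on token *cores* so punctuation stuck to a token (e.g.
--     ``"Francisco,"``) still matches. Empty tokens (left over from a prior
--     multi-word replacement) are skipped so they don't break a match.
--     """
--     n = len(words)
--     j = i
--     for ptok in phrase:
--         while j < n and not _core(str(words[j].get("word", ""))):
--             j += 1
--         if j >= n:
--             return 0
--         core = _core(str(words[j].get("word", "")))
--         a, b = (core.lower(), ptok.lower()) if ci else (core, ptok)
--         if a != b:
--             return 0
--         j += 1
--     return j - i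
--
-- def _apply_phrase_replacement(
--     words: list[dict], phrase: list[str], new: str, ci: bool
-- ) -> int:
--     """Replace every run of ``words`` that matches ``phrase`` with ``new``.
--
--     If ``new`` has the same token count as ``phrase``, each token's core is
--     replaced 1:1 so per-word timing + punctuation survive. Otherwise the full
--     replacement is placed in the first matched slot and subsequent matched
--     slots are cleared (their timing is preserved but the ``word`` string is
--     emptied so rebuilt text skips them).
--     """
--     if not phrase:
--         return 0
--     new_tokens = new.split()
--     count = 0
--     i = 0
--     while i < len(words):
--         span = _phrase_match_at(words, i, phrase, ci)
--         if not span: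
--             i += 1
--             continue
--         # Collect the indices of the non-empty tokens inside the matched span.
--         slots: list[int] = []
--         j = i
--         while len(slots) < len(phrase):
--             if _core(str(words[j].get("word", ""))):
--                 slots.append(j)
--             j += 1
--         first = slots[0]
--         last = slots[-1]
--         lead_first, _, _ = _split_token(str(words[first].get("word", "")))
--         _, _, trail_last = _split_token(str(words[last].get("word", "")))
--         if len(new_tokens) == len(phrase):
--             for k, idx in enumerate(slots):
--                 lead, _, trail = _split_token(str(words[idx].get("word", "")))
--                 words[idx]["word"] = f"{lead}{new_tokens[k]}{trail}"
--         else: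
--             if new:
--                 words[first]["word"] = f"{lead_first}{new}{trail_last}"
--             else:
--                 words[first]["word"] = f"{lead_first}{trail_last}"
--             for idx in slots[1:]:
--                 words[idx]["word"] = ""
--         count += 1
--         i = last + 1
--     return count
-- ===== SOURCE B (Python) =====
-- # B: pure counting pass -- extract non-empty token cores once (normalised for case
-- # if ci), then a single greedy non-overlapping scan of that list for the phrase.
-- # Equivalence is about the RETURN value only: unlike A, B does not mutate `words`.
-- _PUNCT_CHARS = '.,!?\u00bf\u00a1"\'`\u00b4\u201c\u201d\u201e\u2018\u2019\u00ab\u00bb()[]{}:;\u2026\u2014\u2013-\u2022\u00b7'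
--
-- def _apply_phrase_replacement(words, phrase, new, ci):
--     if not phrase:
--         return 0
--     cores = []
--     for w in words:
--         c = str(w.get("word", "")).strip(_PUNCT_CHARS)
--         if c:
--             cores.append(c.lower() if ci else c)
--     target = [p.lower() for p in phrase] if ci else list(phrase)
--     m = len(target)
--     count = 0
--     p = 0
--     while p + m <= len(cores):
--         if cores[p:p + m] == target:
--             count += 1
--             p += m
--         else:
--             p += 1
--     return count
-- ===== Notes on version B (the rewrite author's own statement) =====
-- stated objective: alternative
-- what changed: A interleaves matching, slot re-collection and in-place token rewriting while re-splitting punctuation cores at every probe position; B extracts the non-empty case-normalised token cores once and counts greedy non-overlapping phrase matches in a single scan of that list (return value only: B does not mutate words).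
import Mathlib
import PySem

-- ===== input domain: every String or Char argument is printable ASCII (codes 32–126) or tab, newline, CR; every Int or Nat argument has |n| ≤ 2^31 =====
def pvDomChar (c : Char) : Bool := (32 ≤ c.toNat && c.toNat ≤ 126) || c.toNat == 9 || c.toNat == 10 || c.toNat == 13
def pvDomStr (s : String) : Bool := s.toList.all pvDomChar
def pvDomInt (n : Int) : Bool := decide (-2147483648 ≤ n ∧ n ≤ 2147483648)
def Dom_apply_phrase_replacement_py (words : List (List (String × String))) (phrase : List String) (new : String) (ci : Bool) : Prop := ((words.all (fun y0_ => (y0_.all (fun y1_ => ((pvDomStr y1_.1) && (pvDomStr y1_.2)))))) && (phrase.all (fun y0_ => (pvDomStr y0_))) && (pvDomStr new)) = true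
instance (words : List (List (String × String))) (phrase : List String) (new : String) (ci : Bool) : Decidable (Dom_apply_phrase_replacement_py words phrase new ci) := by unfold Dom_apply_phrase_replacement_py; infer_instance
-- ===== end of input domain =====

-- B re-implements A as a pure two-phase count (extract non-empty token cores once,
-- then one greedy scan); the equivalence proved here is about the RETURN value only —
-- A also mutates `words` in place, B does not.

-- ===== PORT A =====
-- the module constant _PUNCT (shared by both ports, like the Python module constant)
def pvPunct : List Char :=
  ['.', ',', '!', '?', '¿', '¡', '"', '\'', '`', '´', '“', '”', '„', '‘', '’', '«', '»',
   '(', ')', '[', ']', '{', '}', ':', ';', '…', '—', '–', '-', '•', '·']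

def pvIsPunct (c : Char) : Bool := pvPunct.contains c

-- _split_token: the two index-moving while loops become takeWhile on the front and
-- on the reversed remainder (exact: same scanned characters, same three slices)
def pvSplitTok (t : String) : String × String × String :=
  let cs := t.toList
  let lead := cs.takeWhile pvIsPunct
  let rest := cs.drop lead.length
  let trailRev := rest.reverse.takeWhile pvIsPunct
  (String.ofList lead, String.ofList (rest.reverse.drop trailRev.length).reverse,
   String.ofList trailRev.reverse)

def pvCore (t : String) : String := (pvSplitTok t).2.1

-- str(words[j].get("word", "")) (values are already strings)
def pvWordOf (w : List (String × String)) : String := PySem.Dict.getD (PySem.Dict.ofList w) "word" ""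

-- the inner `while j < n and not _core(...)` skip loop of _phrase_match_at
def pvSkip (ws : List (List (String × String))) (j : Nat) : Nat :=
  if h : j < ws.length then
    if pvCore (pvWordOf ws[j]) = "" then pvSkip ws (j + 1) else j
  else j
termination_by ws.length - j

-- the `for ptok in phrase` loop of _phrase_match_at (j threaded, result j - i)
def pvMatchGo (ws : List (List (String × String))) (ci : Bool) (i : Nat) :
    List String → Nat → Int
  | [], j => (j : Int) - (i : Int)
  | ptok :: ps, j =>
    let j' := pvSkip ws j
    if h : j' < ws.length then
      let core := pvCore (pvWordOf ws[j'])
      let ab := if ci then (PySem.Str.lower core, PySem.Str.lower ptok) else (core, ptok)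
      if ab.1 ≠ ab.2 then 0 else pvMatchGo ws ci i ps (j' + 1)
    else 0

def pvMatchAt (ws : List (List (String × String))) (i : Nat) (phrase : List String)
    (ci : Bool) : Int := pvMatchGo ws ci i phrase i

-- the `while len(slots) < len(phrase)` collection loop (need = slots still missing;
-- Python indexes past the end would raise — unreachable, guarded by the length test)
def pvSlots (ws : List (List (String × String))) (need j : Nat) : List Nat :=
  if need = 0 then []
  else if h : j < ws.length then
    if pvCore (pvWordOf ws[j]) = "" then pvSlots ws need (j + 1)
    else j :: pvSlots ws (need - 1) (j + 1)
  else []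
termination_by ws.length - j

-- words[idx]["word"] = s
def pvSetWord (ws : List (List (String × String))) (idx : Nat) (s : String) :
    List (List (String × String)) :=
  ws.set idx (((PySem.Dict.ofList (ws.getD idx [])).insert "word" s).items)

-- the replacement block of the matched span (both branches of A's `if len(new_tokens) == len(phrase)`)
def pvMutate (ws : List (List (String × String))) (slots : List Nat) (first : Nat)
    (phraseLen : Nat) (newToks : List String) (new leadFirst trailLast : String) :
    List (List (String × String)) :=
  if newToks.length = phraseLen then
    (PySem.List.enumerate slots).foldl
      (fun acc kidx =>
        let st := pvSplitTok (pvWordOf (acc.getD kidx.2 []))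
        pvSetWord acc kidx.2 (st.1 ++ PySem.List.pyGetD newToks kidx.1 "" ++ st.2.2))
      ws
  else
    let base :=
      if new ≠ "" then pvSetWord ws first (leadFirst ++ new ++ trailLast)
      else pvSetWord ws first (leadFirst ++ trailLast)
    (slots.drop 1).foldl (fun acc idx => pvSetWord acc idx "") base

-- (termination helper for pvLoop: the mutation block never changes the list's length)
theorem pvFoldSet_length {α : Type} (l : List α) (g : α → Nat)
    (f : List (List (String × String)) → α → String)
    (ws : List (List (String × String))) :
    (l.foldl (fun acc a => pvSetWord acc (g a) (f acc a)) ws).length = ws.length := by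
  induction l generalizing ws with
  | nil => rfl
  | cons a l ih => rw [List.foldl_cons, ih]; simp [pvSetWord]

theorem pvMutate_length (ws : List (List (String × String))) (slots : List Nat)
    (first phraseLen : Nat) (newToks : List String) (new leadFirst trailLast : String) :
    (pvMutate ws slots first phraseLen newToks new leadFirst trailLast).length = ws.length := by
  unfold pvMutate
  split
  · exact pvFoldSet_length _ _ _ _
  · split <;>
      exact (pvFoldSet_length _ (fun idx => idx) (fun _ _ => "") _).trans (by simp [pvSetWord])

-- the outer `while i < len(words)` loop of _apply_phrase_replacement
def pvLoop (phrase newToks : List String) (new : String) (ci : Bool)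
    (ws : List (List (String × String))) (count : Int) (i : Nat) : Int :=
  if h : i < ws.length then
    if pvMatchAt ws i phrase ci = 0 then
      pvLoop phrase newToks new ci ws count (i + 1)
    else
      let slots := pvSlots ws phrase.length i
      let first := slots.headD 0
      let last := slots.getLastD 0
      let leadFirst := (pvSplitTok (pvWordOf (ws.getD first []))).1
      let trailLast := (pvSplitTok (pvWordOf (ws.getD last []))).2.2
      let ws2 := pvMutate ws slots first phrase.length newToks new leadFirst trailLast
      if h2 : i < last + 1 then
        pvLoop phrase newToks new ci ws2 (count + 1) (last + 1)
      else count + 1  -- unreachable (slots all lie at indices ≥ i): totality guard only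
  else count
termination_by ws.length - i
decreasing_by
  · omega
  · simp only [pvMutate_length]
    have h3 : i < (pvSlots ws phrase.length i).getLastD 0 + 1 := h2
    omega

def apply_phrase_replacement_py (words : List (List (String × String)))
    (phrase : List String) (new : String) (ci : Bool) : Int :=
  if phrase = [] then 0
  else pvLoop phrase (PySem.Str.split₀ new) new ci words 0 0

-- ===== PORT B =====
def pvPunctStr : String := String.ofList pvPunct

-- cores = the non-empty stripped tokens, case-normalised once if ci
def altCores : List (List (String × String)) → Bool → List String
  | [], _ => []
  | w :: ws, ci =>
    let c := PySem.Str.stripChars (pvWordOf w) pvPunctStr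
    if c = "" then altCores ws ci
    else (if ci then PySem.Str.lower c else c) :: altCores ws ci

-- the single greedy scan `while p + m <= len(cores)` (target is t :: ts, m = ts.length + 1;
-- cores[p:p+m] on these in-range bounds is (cores.drop p).take m)
def altLoop (cores : List String) (t : String) (ts : List String) (count : Int) (p : Nat) : Int :=
  if p + (ts.length + 1) ≤ cores.length then
    if (cores.drop p).take (ts.length + 1) = t :: ts then
      altLoop cores t ts (count + 1) (p + (ts.length + 1))
    else altLoop cores t ts count (p + 1)
  else count
termination_by cores.length + 1 - p

def apply_phrase_replacement_py_alt (words : List (List (String × String)))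
    (phrase : List String) (new : String) (ci : Bool) : Int :=
  match (if ci then phrase.map PySem.Str.lower else phrase) with
  | [] => 0
  | t :: ts => altLoop (altCores words ci) t ts 0 0

-- ===== PRECONDITION & SPEC =====
def Spec_apply_phrase_replacement_py (words : List (List (String × String))) (phrase : List String) (new : String) (ci : Bool) (out : Int) : Prop := out = apply_phrase_replacement_py_alt words phrase new ci
instance (words : List (List (String × String))) (phrase : List String) (new : String) (ci : Bool) (out : Int) : Decidable (Spec_apply_phrase_replacement_py words phrase new ci out) := by unfold Spec_apply_phrase_replacement_py; infer_instance

-- ===== CLAIM (what is proved, stated in full; the proofs are below) =====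
def Claim_equal_apply_phrase_replacement_py : Prop := ∀ (words : List (List (String × String))) (phrase : List String) (new : String) (ci : Bool), Dom_apply_phrase_replacement_py words phrase new ci → Spec_apply_phrase_replacement_py words phrase new ci (apply_phrase_replacement_py words phrase new ci)

-- ===== LEMMAS AND PROOFS =====

-- the case-normalisation both programs apply before comparing
def pvKey (ci : Bool) (s : String) : String := if ci then PySem.Str.lower s else s

-- proof-side suffix form of B's greedy scan
def pvGoB (t : String) (ts : List String) : List String → Int → Int
  | cs, count =>
    if ts.length + 1 ≤ cs.length then
      if cs.take (ts.length + 1) = t :: ts then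
        pvGoB t ts (cs.drop (ts.length + 1)) (count + 1)
      else pvGoB t ts cs.tail count
    else count
termination_by cs => cs.length
decreasing_by
  · simp; omega
  · simp [List.length_tail]; omega

-- cs.drop (takeWhile p cs).length = dropWhile p cs (no Mathlib lemma in this form)
theorem pv_drop_len_takeWhile (p : Char → Bool) : ∀ (cs : List Char),
    cs.drop (cs.takeWhile p).length = cs.dropWhile p := by
  intro cs
  induction cs with
  | nil => rfl
  | cons c cs ih => by_cases h : p c <;> simp [h, ih]

theorem core_eq_strip (t : String) :
    PySem.Str.stripChars t pvPunctStr = pvCore t := by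
  simp only [PySem.Str.stripChars, PySem.Chars.stripChars, pvPunctStr, String.toList_ofList,
    pvCore, pvSplitTok, pv_drop_len_takeWhile]
  rfl

theorem pv_getLastD_mem {α : Type} (l : List α) (d : α) (h : l ≠ []) : l.getLastD d ∈ l := by
  rw [List.getLastD_eq_getLast?]
  cases hl : l.getLast? with
  | none => simp [List.getLast?_eq_none_iff] at hl; exact absurd hl h
  | some a => simpa using List.mem_of_getLast? hl

theorem pv_getLastD_congr {α : Type} (l : List α) (d d' : α) (h : l ≠ []) :
    l.getLastD d = l.getLastD d' := by
  rw [List.getLastD_eq_getLast?, List.getLastD_eq_getLast?]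
  cases hl : l.getLast? with
  | none => simp [List.getLast?_eq_none_iff] at hl; exact absurd hl h
  | some a => simp

theorem altCores_cons (w : List (String × String)) (ws : List (List (String × String)))
    (ci : Bool) :
    altCores (w :: ws) ci =
      if pvCore (pvWordOf w) = "" then altCores ws ci
      else pvKey ci (pvCore (pvWordOf w)) :: altCores ws ci := by
  simp only [altCores, core_eq_strip, pvKey]

theorem altCores_drop_of_ge (ws : List (List (String × String))) (ci : Bool) (i : Nat)
    (h : ws.length ≤ i) : altCores (ws.drop i) ci = [] := by
  rw [List.drop_eq_nil_of_le h]; rfl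

theorem altCores_drop_empty (ws : List (List (String × String))) (ci : Bool) (i : Nat)
    (h : i < ws.length) (hc : pvCore (pvWordOf ws[i]) = "") :
    altCores (ws.drop i) ci = altCores (ws.drop (i + 1)) ci := by
  rw [List.drop_eq_getElem_cons h, altCores_cons, if_pos hc]

theorem altCores_drop_cons (ws : List (List (String × String))) (ci : Bool) (i : Nat)
    (h : i < ws.length) (hc : pvCore (pvWordOf ws[i]) ≠ "") :
    altCores (ws.drop i) ci =
      pvKey ci (pvCore (pvWordOf ws[i])) :: altCores (ws.drop (i + 1)) ci := by
  rw [List.drop_eq_getElem_cons h, altCores_cons, if_neg hc]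

theorem pvSkip_le (ws : List (List (String × String))) (j : Nat) : j ≤ pvSkip ws j := by
  fun_induction pvSkip ws j with
  | case1 j h hc ih => omega
  | case2 j h hc => omega
  | case3 j h => omega

theorem pvSkip_cores (ws : List (List (String × String))) (ci : Bool) (j : Nat) :
    altCores (ws.drop j) ci = altCores (ws.drop (pvSkip ws j)) ci := by
  fun_induction pvSkip ws j with
  | case1 j h hc ih => rw [altCores_drop_empty ws ci j h hc]; exact ih
  | case2 j h hc => rfl
  | case3 j h => rfl

theorem pvSkip_core_ne (ws : List (List (String × String))) : ∀ (j : Nat),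
    pvSkip ws j < ws.length → ∀ (h : pvSkip ws j < ws.length),
    pvCore (pvWordOf ws[pvSkip ws j]) ≠ "" := by
  intro j
  fun_induction pvSkip ws j with
  | case1 j h hc ih => exact ih
  | case2 j h hc => intro _ _; exact hc
  | case3 j h => intro hlt; omega

theorem matchGo_eq_zero_iff (ws : List (List (String × String))) (ci : Bool) (i : Nat) :
    ∀ (ps : List String) (j : Nat), i ≤ j → (ps = [] → i < j) →
      (pvMatchGo ws ci i ps j = 0 ↔
        ¬ (ps.map (pvKey ci) <+: altCores (ws.drop j) ci)) := by
  intro ps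
  induction ps with
  | nil =>
    intro j hij hne
    have := hne rfl
    simp only [pvMatchGo, List.map_nil, List.nil_prefix, not_true_eq_false, iff_false]
    omega
  | cons p ps ih =>
    intro j hij _
    have hle : j ≤ pvSkip ws j := pvSkip_le ws j
    rw [pvSkip_cores ws ci j]
    simp only [pvMatchGo]
    by_cases h : pvSkip ws j < ws.length
    · rw [dif_pos h]
      have hc := pvSkip_core_ne ws j h h
      rw [altCores_drop_cons ws ci _ h hc]
      have hab1 : (if ci then (PySem.Str.lower (pvCore (pvWordOf ws[pvSkip ws j])),
            PySem.Str.lower p) else (pvCore (pvWordOf ws[pvSkip ws j]), p)).1 =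
          pvKey ci (pvCore (pvWordOf ws[pvSkip ws j])) := by cases ci <;> rfl
      have hab2 : (if ci then (PySem.Str.lower (pvCore (pvWordOf ws[pvSkip ws j])),
            PySem.Str.lower p) else (pvCore (pvWordOf ws[pvSkip ws j]), p)).2 =
          pvKey ci p := by cases ci <;> rfl
      rw [hab1, hab2]
      by_cases heq : pvKey ci (pvCore (pvWordOf ws[pvSkip ws j])) = pvKey ci p
      · rw [if_neg (by simpa using heq)]
        rw [ih (pvSkip ws j + 1) (by omega) (by intro _; omega)]
        simp [List.cons_prefix_cons, heq]
      · rw [if_pos (by simpa using heq)]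
        simp only [List.map_cons, List.cons_prefix_cons]
        exact ⟨fun _ hpre => heq hpre.1.symm, fun _ => trivial⟩
    · rw [dif_neg h]
      rw [altCores_drop_of_ge ws ci _ (by omega)]
      simp

theorem pvSlots_mem_ge (ws : List (List (String × String))) :
    ∀ (j need x : Nat), x ∈ pvSlots ws need j → j ≤ x := by
  intro j need
  fun_induction pvSlots ws need j with
  | case1 j => simp
  | case2 need j hne0 hlt hc ih => intro x hx; have := ih x hx; omega
  | case3 need j hne0 hlt hc ih =>
    intro x hx
    rcases List.mem_cons.mp hx with rfl | hx'
    · omega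
    · have := ih x hx'; omega
  | case4 need j hne0 hlt => simp

theorem pvSlots_mem_le_last (ws : List (List (String × String))) :
    ∀ (j need x : Nat), x ∈ pvSlots ws need j → x ≤ (pvSlots ws need j).getLastD 0 := by
  intro j need
  fun_induction pvSlots ws need j with
  | case1 j => simp
  | case2 need j hne0 hlt hc ih => exact ih
  | case3 need j hne0 hlt hc ih =>
    intro x hx
    by_cases htl : pvSlots ws (need - 1) (j + 1) = []
    · rw [htl] at hx ⊢
      simp at hx
      simp [hx]
    · rw [List.getLastD_cons, pv_getLastD_congr _ j 0 htl]
      rcases List.mem_cons.mp hx with hxj | hx'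
      · have hmem := pv_getLastD_mem _ (0 : Nat) htl
        have := pvSlots_mem_ge ws (j + 1) (need - 1) _ hmem
        omega
      · exact ih x hx'
  | case4 need j hne0 hlt => simp

theorem pvSlots_spec (ws : List (List (String × String))) (ci : Bool) :
    ∀ (j need : Nat), 1 ≤ need → need ≤ (altCores (ws.drop j) ci).length →
      pvSlots ws need j ≠ [] ∧
      j ≤ (pvSlots ws need j).getLastD 0 ∧
      (pvSlots ws need j).getLastD 0 < ws.length ∧
      altCores (ws.drop ((pvSlots ws need j).getLastD 0 + 1)) ci =
        (altCores (ws.drop j) ci).drop need := by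
  intro j need
  fun_induction pvSlots ws need j with
  | case1 j => exact fun h1 => absurd h1 (by omega)
  | case2 need j hne0 hlt hc ih =>
    intro h1 h2
    rw [altCores_drop_empty ws ci j hlt hc] at h2 ⊢
    obtain ⟨a, b, c, d⟩ := ih h1 h2
    exact ⟨a, by omega, c, d⟩
  | case3 need j hne0 hlt hc ih =>
    intro h1 h2
    rw [altCores_drop_cons ws ci j hlt hc] at h2 ⊢
    by_cases htl : pvSlots ws (need - 1) (j + 1) = []
    · -- need = 1 (a nonempty tail is impossible only when need - 1 = 0 or no cores left;
      -- in both subcases the list of slots is [j])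
      rw [htl]
      have hdrop : (pvKey ci (pvCore (pvWordOf ws[j])) :: altCores (ws.drop (j + 1)) ci).drop need
          = (altCores (ws.drop (j + 1)) ci).drop (need - 1) := by
        obtain ⟨n, rfl⟩ : ∃ n, need = n + 1 := ⟨need - 1, by omega⟩
        simp
      by_cases hn : need - 1 = 0
      · refine ⟨by simp, by simp, by simpa using hlt, ?_⟩
        rw [hdrop, hn]
        simp
      · -- need - 1 ≥ 1 but the recursive slots are []: contradicts the spec hypothesis
        exfalso
        have h2' : need - 1 ≤ (altCores (ws.drop (j + 1)) ci).length := by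
          simp at h2; omega
        have := (ih (by omega) h2').1
        exact this htl
    · have h2' : need - 1 ≤ (altCores (ws.drop (j + 1)) ci).length := by
        simp at h2; omega
      have h1' : 1 ≤ need - 1 := by
        by_contra hcon
        have hz : need - 1 = 0 := by omega
        rw [hz] at htl
        exact htl (by simp [pvSlots])
      obtain ⟨_, hge, hlt', hdrop'⟩ := ih h1' h2'
      rw [List.getLastD_cons, pv_getLastD_congr _ j 0 htl]
      refine ⟨by simp, by omega, hlt', ?_⟩
      rw [hdrop']
      obtain ⟨n, rfl⟩ : ∃ n, need = n + 1 := ⟨need - 1, by omega⟩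
      simp
  | case4 need j hne0 hlt =>
    intro h1 h2
    rw [altCores_drop_of_ge ws ci j (by omega)] at h2
    simp at h2
    omega

theorem pvFoldSet_drop {α : Type} (l : List α) (g : α → Nat)
    (f : List (List (String × String)) → α → String)
    (ws : List (List (String × String))) (L : Nat) (h : ∀ a ∈ l, g a ≤ L) :
    (l.foldl (fun acc a => pvSetWord acc (g a) (f acc a)) ws).drop (L + 1) =
      ws.drop (L + 1) := by
  induction l generalizing ws with
  | nil => rfl
  | cons a l ih =>
    rw [List.foldl_cons, ih _ (fun b hb => h b (List.mem_cons_of_mem a hb))]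
    exact List.drop_set_of_lt (by have := h a (List.mem_cons_self); omega)

theorem pvMutate_drop (ws : List (List (String × String))) (slots : List Nat)
    (first phraseLen : Nat) (newToks : List String) (new leadFirst trailLast : String)
    (L : Nat) (hf : first ≤ L) (hs : ∀ x ∈ slots, x ≤ L) :
    (pvMutate ws slots first phraseLen newToks new leadFirst trailLast).drop (L + 1) =
      ws.drop (L + 1) := by
  unfold pvMutate
  split
  · refine pvFoldSet_drop _ (fun kidx : Int × Nat => kidx.2) _ ws L ?_
    intro a ha
    obtain ⟨k, hk, rfl⟩ := (PySem.List.mem_enumerate_iff _ _ _).mp ha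
    exact hs _ (List.getElem_mem hk)
  · have hbase : ∀ (v : String), ((pvSetWord ws first v).drop (L + 1)) = ws.drop (L + 1) :=
      fun v => List.drop_set_of_lt (by omega)
    have hfold : ∀ (base : List (List (String × String))),
        ((slots.drop 1).foldl (fun acc idx => pvSetWord acc idx "") base).drop (L + 1) =
          base.drop (L + 1) := by
      intro base
      exact pvFoldSet_drop _ (fun idx => idx) (fun _ _ => "") base L
        (fun a ha => hs a (List.mem_of_mem_drop ha))
    split <;> (rw [hfold]; exact hbase _)

theorem pvGoB_step_no (t : String) (ts : List String) (cs : List String) (count : Int)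
    (h : ¬ ((t :: ts) <+: cs)) : pvGoB t ts cs count = pvGoB t ts cs.tail count := by
  rw [pvGoB]
  split
  · have hno : ¬ (cs.take (ts.length + 1) = t :: ts) :=
      fun htake => h (htake ▸ List.take_prefix (ts.length + 1) cs)
    rw [if_neg hno]
  · rename_i hlen
    rw [pvGoB, if_neg (by simp at hlen ⊢; omega)]

theorem pvGoB_step_yes (t : String) (ts : List String) (cs : List String) (count : Int)
    (h : (t :: ts) <+: cs) : pvGoB t ts cs count = pvGoB t ts (cs.drop (ts.length + 1)) (count + 1) := by
  have hlen := h.length_le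
  simp only [List.length_cons] at hlen
  rw [pvGoB, if_pos hlen, if_pos (by
    have := List.prefix_iff_eq_take.mp h
    simpa using this.symm)]

theorem altLoop_eq_goB (cores : List String) (t : String) (ts : List String) :
    ∀ (p : Nat) (count : Int),
      altLoop cores t ts count p = pvGoB t ts (cores.drop p) count := by
  intro p count
  fun_induction altLoop cores t ts count p with
  | case1 count p hcond htake ih =>
    rw [pvGoB, if_pos (by simp; omega), if_pos htake, ih, List.drop_drop]
  | case2 count p hcond htake ih =>
    rw [pvGoB, if_pos (by simp; omega), if_neg htake, ih, List.tail_drop]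
  | case3 count p hcond =>
    rw [pvGoB, if_neg (by simp; omega)]

theorem pvLoop_eq (q : String) (qs newToks : List String) (new : String) (ci : Bool) :
    ∀ (fuel : Nat) (ws : List (List (String × String))) (count : Int) (i : Nat),
      ws.length ≤ i + fuel →
      pvLoop (q :: qs) newToks new ci ws count i =
        pvGoB (pvKey ci q) (qs.map (pvKey ci)) (altCores (ws.drop i) ci) count := by
  intro fuel
  induction fuel with
  | zero =>
    intro ws count i hfuel
    rw [pvLoop, dif_neg (by omega), altCores_drop_of_ge ws ci i (by omega)]
    rw [pvGoB, if_neg (by simp)]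
  | succ fuel ih =>
    intro ws count i hfuel
    by_cases h : i < ws.length
    swap
    · rw [pvLoop, dif_neg h, altCores_drop_of_ge ws ci i (by omega)]
      rw [pvGoB, if_neg (by simp)]
    rw [pvLoop, dif_pos h]
    have hmatch := matchGo_eq_zero_iff ws ci i (q :: qs) i (le_refl i) (by simp)
    by_cases hz : pvMatchAt ws i (q :: qs) ci = 0
    · -- no match at i
      rw [if_pos hz]
      rw [ih ws count (i + 1) (by omega)]
      have hnp : ¬ ((q :: qs).map (pvKey ci) <+: altCores (ws.drop i) ci) :=
        (hmatch).mp hz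
      by_cases hc : pvCore (pvWordOf ws[i]) = ""
      · rw [altCores_drop_empty ws ci i h hc]
      · rw [altCores_drop_cons ws ci i h hc]
        rw [altCores_drop_cons ws ci i h hc] at hnp
        rw [List.map_cons] at hnp
        rw [pvGoB_step_no _ _ _ _ hnp, List.tail_cons]
    · -- match at i
      rw [if_neg hz]
      have hpre : (q :: qs).map (pvKey ci) <+: altCores (ws.drop i) ci := by
        by_contra hcon
        exact hz (hmatch.mpr hcon)
      have hlen : qs.length + 1 ≤ (altCores (ws.drop i) ci).length := by
        have := hpre.length_le
        simpa using this
      obtain ⟨hne, hge, hlt, hdrop⟩ :=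
        pvSlots_spec ws ci i (q :: qs).length (by simp) (by simpa using hlen)
      set slots := pvSlots ws (q :: qs).length i with hslots
      set last := slots.getLastD 0 with hlast
      rw [dif_pos (by omega)]
      have hmut : (pvMutate ws slots (slots.headD 0) (q :: qs).length newToks new
            (pvSplitTok (pvWordOf (ws.getD (slots.headD 0) []))).1
            (pvSplitTok (pvWordOf (ws.getD last []))).2.2).drop (last + 1) = ws.drop (last + 1) := by
        refine pvMutate_drop ws slots _ _ _ _ _ _ last ?_ ?_
        · have hhead : slots.headD 0 ∈ slots := by
            cases hsl : slots with
            | nil => exact absurd hsl hne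
            | cons a l => simp
          exact pvSlots_mem_le_last ws i (q :: qs).length _ (hslots ▸ hhead)
        · intro x hx
          exact pvSlots_mem_le_last ws i (q :: qs).length x (hslots ▸ hx)
      rw [ih _ (count + 1) (last + 1) (by rw [pvMutate_length]; omega)]
      rw [hmut, hdrop]
      rw [List.map_cons] at hpre
      rw [pvGoB_step_yes _ _ _ _ hpre]
      congr 1
      simp

-- ===== VERDICT (by name: the statement is the Claim_ definition above) =====
theorem apply_phrase_replacement_py_spec : Claim_equal_apply_phrase_replacement_py := by
  intro words phrase new ci _
  unfold Spec_apply_phrase_replacement_py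
  unfold apply_phrase_replacement_py apply_phrase_replacement_py_alt
  cases phrase with
  | nil => cases ci <;> rfl
  | cons q qs =>
    rw [if_neg (by simp)]
    rw [pvLoop_eq q qs (PySem.Str.split₀ new) new ci words.length words 0 0 (by omega)]
    rw [List.drop_zero]
    cases ci with
    | false =>
      show pvGoB (pvKey false q) (qs.map (pvKey false)) (altCores words false) 0 =
        altLoop (altCores words false) q qs 0 0
      rw [altLoop_eq_goB, List.drop_zero]
      have hf : pvKey false = id := funext fun s => rfl
      rw [hf, List.map_id]
      rfl
    | true =>
      show pvGoB (pvKey true q) (qs.map (pvKey true)) (altCores words true) 0 =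
        altLoop (altCores words true) (PySem.Str.lower q) (qs.map PySem.Str.lower) 0 0
      rw [altLoop_eq_goB, List.drop_zero]
      rfl
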